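-- pv_equiv track=rewrite | github.com/xiaoheiyue/mukuro | shanhai_liaoning_remote_sensing/utils/helpers.py | create_pyramid_levels
-- ===== SOURCE A (Python) =====
-- from typing import Dict, List, Optional, Any, Tuple
--
-- def create_pyramid_levels(width: int, height: int, max_level: int = 10) -> List[Tuple[int, int]]:
--     """创建金字塔层级"""
--     levels = []
--     current_width, current_height = width, height
--
--     for level in range(max_level):
--         if current_width < 2 or current_height < 2:
--             break
--         levels.append((current_width, current_height))
--         current_width //= 2
--         current_height //= 2
--
--     return levels
-- ===== SOURCE B (Python) =====
-- def create_pyramid_levels(width: int, height: int, max_level: int = 10):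
--     """Closed-form level count instead of iterative halving with a break."""
--     if width < 2 or height < 2 or max_level <= 0:
--         return []
--     n = min(width.bit_length() - 1, height.bit_length() - 1, max_level)
--     return [(width >> i, height >> i) for i in range(n)]
-- ===== Notes on version B (the rewrite author's own statement) =====
-- stated objective: simpler
-- what changed: Replaces the iterative halving loop with a break by a closed-form level count from bit_length and a single comprehension of right-shifted pairs.
import Mathlib
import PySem

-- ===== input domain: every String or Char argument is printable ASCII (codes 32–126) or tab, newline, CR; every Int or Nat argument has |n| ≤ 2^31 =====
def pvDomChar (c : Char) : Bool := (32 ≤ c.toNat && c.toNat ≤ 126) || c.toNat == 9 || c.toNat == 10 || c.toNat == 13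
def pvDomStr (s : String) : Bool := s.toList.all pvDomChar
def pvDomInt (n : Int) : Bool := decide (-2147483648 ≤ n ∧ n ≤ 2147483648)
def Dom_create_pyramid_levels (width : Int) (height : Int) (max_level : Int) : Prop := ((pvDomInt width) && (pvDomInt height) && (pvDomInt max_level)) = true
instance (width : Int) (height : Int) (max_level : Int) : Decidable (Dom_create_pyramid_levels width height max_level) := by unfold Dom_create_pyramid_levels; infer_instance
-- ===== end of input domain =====

-- B replaces A's iterative halving loop (with break) by a closed-form level count
-- from bit_length and a comprehension of right shifts; objective: simpler.

-- ===== PORT A =====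
-- the 'for level in range(max_level)' loop with break, transliterated as fuel
-- recursion on the remaining iteration count, carrying (current_width,
-- current_height, levels)
def pyrLoopA (fuel : Nat) (cw ch : Int) (acc : List (Int × Int)) : List (Int × Int) :=
  match fuel with
  | 0 => acc
  | f + 1 =>
    if cw < 2 ∨ ch < 2 then acc
    else pyrLoopA f (PySem.Int.floordiv cw 2) (PySem.Int.floordiv ch 2) (acc ++ [(cw, ch)])

def create_pyramid_levels (width : Int) (height : Int) (max_level : Int) : List (Int × Int) :=
  pyrLoopA max_level.toNat width height []

-- ===== PORT B =====
-- 'width >> i' is core Lean's 'width >>> i' (Python-exact per PySem)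
def create_pyramid_levels_alt (width : Int) (height : Int) (max_level : Int) : List (Int × Int) :=
  if width < 2 ∨ height < 2 ∨ max_level ≤ 0 then []
  else
    (PySem.List.pyRange 0
        (min (min ((PySem.Int.bitLength width : Int) - 1)
                  ((PySem.Int.bitLength height : Int) - 1)) max_level) 1).map
      (fun i => (width >>> i.toNat, height >>> i.toNat))

-- ===== PRECONDITION & SPEC =====
def Spec_create_pyramid_levels (width : Int) (height : Int) (max_level : Int) (out : List (Int × Int)) : Prop := out = create_pyramid_levels_alt width height max_level
instance (width : Int) (height : Int) (max_level : Int) (out : List (Int × Int)) : Decidable (Spec_create_pyramid_levels width height max_level out) := by unfold Spec_create_pyramid_levels; infer_instance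

-- ===== CLAIM (what is proved, stated in full; the proofs are below) =====
def Claim_equal_create_pyramid_levels : Prop := ∀ (width : Int) (height : Int) (max_level : Int), Dom_create_pyramid_levels width height max_level → Spec_create_pyramid_levels width height max_level (create_pyramid_levels width height max_level)

-- ===== LEMMAS AND PROOFS =====

theorem pyr_shift1 (a : Int) : a >>> (1 : Nat) = a / 2 := by
  simpa using Int.shiftRight_eq_div_pow a 1

theorem pyr_shift_succ (a : Int) (i : Nat) : a >>> (i + 1) = (a / 2) >>> i := by
  rw [← pyr_shift1, ← Int.shiftRight_add, Nat.add_comm]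

theorem pyr_floordiv_two (a : Int) : PySem.Int.floordiv a 2 = a / 2 :=
  PySem.Int.floordiv_eq_ediv_of_pos (by norm_num)

theorem pyr_bl_ge_two (w : Int) (hw : 2 ≤ w) : 2 ≤ PySem.Int.bitLength w := by
  by_contra hc
  have h1 := PySem.Int.lt_two_pow_bitLength w
  interval_cases hb : PySem.Int.bitLength w <;> simp_all <;> omega

theorem pyr_bl_small (w : Int) (h2 : 2 ≤ w) (h3 : w ≤ 3) : PySem.Int.bitLength w = 2 := by
  interval_cases w <;> decide

theorem pyr_bl_half (w : Int) (hw : 2 ≤ w) :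
    PySem.Int.bitLength (w / 2) = PySem.Int.bitLength w - 1 := by
  have h := PySem.Int.bitLength_of_pos (show (0:Int) < w by omega)
  rw [pyr_floordiv_two] at h
  omega

theorem pyrLoopA_acc (f : Nat) : ∀ (cw ch : Int) (acc : List (Int × Int)),
    pyrLoopA f cw ch acc = acc ++ pyrLoopA f cw ch [] := by
  induction f with
  | zero => intro cw ch acc; simp [pyrLoopA]
  | succ f ih =>
    intro cw ch acc
    simp only [pyrLoopA]
    split
    · simp
    · rw [ih _ _ (acc ++ [(cw, ch)]), ih _ _ ([] ++ [(cw, ch)])]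
      simp

theorem pyrLoopA_nil (f : Nat) (cw ch : Int) (h : cw < 2 ∨ ch < 2) :
    pyrLoopA f cw ch [] = [] := by
  cases f with
  | zero => rfl
  | succ f => simp only [pyrLoopA, if_pos h]

theorem pyr_key : ∀ (f : Nat) (w h : Int), 2 ≤ w → 2 ≤ h →
    pyrLoopA f w h [] =
      (List.range (min (min (PySem.Int.bitLength w - 1) (PySem.Int.bitLength h - 1)) f)).map
        (fun (i : Nat) => ((w >>> i : Int), (h >>> i : Int))) := by
  intro f
  induction f with
  | zero => intro w h _ _; simp [pyrLoopA]
  | succ f ih =>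
    intro w h hw hh
    have hlw := pyr_bl_ge_two w hw
    have hlh := pyr_bl_ge_two h hh
    have hstep : pyrLoopA (f + 1) w h [] =
        (w, h) :: pyrLoopA f (w / 2) (h / 2) [] := by
      simp only [pyrLoopA, if_neg (by omega : ¬ (w < 2 ∨ h < 2)), pyr_floordiv_two]
      rw [pyrLoopA_acc]
      simp
    by_cases hsmall : w / 2 < 2 ∨ h / 2 < 2
    · -- at most one level: one of the halves drops below 2
      have hend : PySem.Int.bitLength w = 2 ∨ PySem.Int.bitLength h = 2 := by
        rcases hsmall with hs | hs
        · exact Or.inl (pyr_bl_small w hw (by omega))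
        · exact Or.inr (pyr_bl_small h hh (by omega))
      have hmin : min (min (PySem.Int.bitLength w - 1) (PySem.Int.bitLength h - 1)) (f + 1) = 1 := by
        omega
      rw [hstep, pyrLoopA_nil f _ _ hsmall, hmin]
      simp [Int.shiftRight_zero]
    · have hw4 : 2 ≤ w / 2 := by omega
      have hh4 : 2 ≤ h / 2 := by omega
      rw [hstep, ih (w / 2) (h / 2) hw4 hh4, pyr_bl_half w hw, pyr_bl_half h hh]
      have hmin : min (min (PySem.Int.bitLength w - 1) (PySem.Int.bitLength h - 1)) (f + 1) =
          min (min (PySem.Int.bitLength w - 1 - 1) (PySem.Int.bitLength h - 1 - 1)) f + 1 := by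
        omega
      rw [hmin, List.range_succ_eq_map, List.map_cons, List.map_map]
      simp [Function.comp_def, pyr_shift_succ, Int.shiftRight_zero]

-- ===== VERDICT (by name: the statement is the Claim_ definition above) =====
theorem create_pyramid_levels_spec : Claim_equal_create_pyramid_levels := by
  intro w h ml _
  unfold Spec_create_pyramid_levels create_pyramid_levels create_pyramid_levels_alt
  by_cases hpre : w < 2 ∨ h < 2 ∨ ml ≤ 0
  · rw [if_pos hpre]
    rcases hpre with hp | hp | hp
    · exact pyrLoopA_nil _ _ _ (Or.inl hp)
    · exact pyrLoopA_nil _ _ _ (Or.inr hp)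
    · have h0 : ml.toNat = 0 := by omega
      rw [h0]; rfl
  · push_neg at hpre
    obtain ⟨hw, hh, hml⟩ := hpre
    rw [if_neg (by omega)]
    rw [pyr_key ml.toNat w h hw hh]
    have hlw := pyr_bl_ge_two w hw
    have hlh := pyr_bl_ge_two h hh
    rw [PySem.List.pyRange_one, List.map_map]
    have hn : ((min (min ((PySem.Int.bitLength w : Int) - 1) ((PySem.Int.bitLength h : Int) - 1))
        ml) - 0).toNat = min (min (PySem.Int.bitLength w - 1) (PySem.Int.bitLength h - 1))
        ml.toNat := by
      omega
    rw [hn]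
    apply List.map_congr_left
    intro i _
    simp [Int.shiftRight_natCast_right]
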